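-- pv_equiv track=rewrite | github.com/mit-submit/A2rchi | src/interfaces/chat_app/utils.py | collapse_assistant_sequences
-- ===== SOURCE A (Python) =====
-- def collapse_assistant_sequences(history_rows, sender_name=None, sender_index=0):
--     """
--     Keep only the latest assistant response within any contiguous block.
--     Works for both simple history tuples and extended rows with metadata.
--     """
--     if not history_rows:
--         return history_rows
--
--     collapsed = []
--     assistant_run = []
--     for row in history_rows:
--         sender = row[sender_index]
--         if sender == sender_name:
--             assistant_run.append(row)
--         else:
--             if assistant_run:
--                 collapsed.append(assistant_run[-1])
--                 assistant_run = []
--             collapsed.append(row)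
--
--     if assistant_run:
--         collapsed.append(assistant_run[-1])
--
--     return collapsed
-- ===== SOURCE B (Python) =====
-- def collapse_assistant_sequences(history_rows, sender_name=None, sender_index=0):
--     """Successor-based single filter: keep a row unless it is an assistant row
--     whose immediate successor is also an assistant row (so only the last row of
--     each contiguous assistant run survives)."""
--     if not history_rows:
--         return history_rows
--     keep_next = [row[sender_index] != sender_name for row in history_rows[1:]] + [True]
--     return [row for row, keep in zip(history_rows, keep_next)
--             if row[sender_index] != sender_name or keep]
-- ===== Notes on version B (the rewrite author's own statement) =====
-- stated objective: simpler
-- what changed: Replaced the run-buffer-with-flush loop (accumulate assistant rows, emit the buffer's last element on each break and at the end) by a single successor-based zip-and-filter: a row is kept iff it is not an assistant row or its immediate successor is not an assistant row.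
-- outside the precondition, e.g. on collapse_assistant_sequences([('ai', 'x')], 'ai', 5): A raises IndexError, B raises IndexError
import Mathlib
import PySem

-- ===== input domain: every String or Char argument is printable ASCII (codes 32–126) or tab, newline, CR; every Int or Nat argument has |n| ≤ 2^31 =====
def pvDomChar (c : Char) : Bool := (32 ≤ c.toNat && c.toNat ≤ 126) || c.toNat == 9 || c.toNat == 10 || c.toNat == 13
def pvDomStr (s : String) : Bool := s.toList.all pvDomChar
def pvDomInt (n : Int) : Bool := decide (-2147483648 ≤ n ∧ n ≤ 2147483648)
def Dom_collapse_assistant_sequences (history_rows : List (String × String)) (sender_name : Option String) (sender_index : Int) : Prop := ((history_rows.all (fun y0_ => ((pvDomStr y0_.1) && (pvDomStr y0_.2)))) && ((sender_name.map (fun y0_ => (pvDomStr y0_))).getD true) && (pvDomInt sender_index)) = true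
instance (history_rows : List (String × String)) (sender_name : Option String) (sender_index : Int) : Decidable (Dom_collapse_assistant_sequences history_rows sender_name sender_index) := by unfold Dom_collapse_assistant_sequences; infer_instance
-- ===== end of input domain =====

-- B replaces A's run-buffer-and-flush loop by a single successor-based filter
-- (keep a row unless it and its immediate successor are both assistant rows);
-- objective: simpler.

-- ===== PORT A =====
-- row[sender_index] on a 2-tuple, as Python tuple indexing (negative allowed);
-- none = IndexError, excluded by Pre_; the .getD "" default is never reached inside Pre_.
def pvRowGet (row : String × String) (i : Int) : String :=
  (PySem.List.pyGet? [row.1, row.2] i).getD ""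

-- `row[sender_index] == sender_name`: comparing a str to None is always False in Python.
def pvIsName (sender_name : Option String) (sender_index : Int) (row : String × String) : Bool :=
  match sender_name with
  | none => false
  | some s => pvRowGet row sender_index == s

-- A's for-loop over (collapsed, assistant_run), including the final flush;
-- assistant_run[-1] is PySem.List.pyGet? run (-1) (never none when run ≠ []).
def pvLoopA (isN : String × String → Bool) (collapsed run : List (String × String)) :
    List (String × String) → List (String × String)
  | [] =>
      if run.isEmpty then collapsed
      else collapsed ++ [(PySem.List.pyGet? run (-1)).getD ("", "")]
  | row :: rest =>
      if isN row then pvLoopA isN collapsed (run ++ [row]) rest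
      else if run.isEmpty then pvLoopA isN (collapsed ++ [row]) [] rest
      else pvLoopA isN (collapsed ++ [(PySem.List.pyGet? run (-1)).getD ("", ""), row]) [] rest

def collapse_assistant_sequences (history_rows : List (String × String)) (sender_name : Option String) (sender_index : Int) : List (String × String) :=
  if history_rows.isEmpty then history_rows
  else pvLoopA (pvIsName sender_name sender_index) [] [] history_rows

-- ===== PORT B =====
-- keep_next = [row[sender_index] != sender_name for row in history_rows[1:]] + [True]
-- (history_rows[1:] is List.drop 1 — exact for this nonnegative slice), then one
-- zip-and-filter comprehension.
def collapse_assistant_sequences_alt (history_rows : List (String × String)) (sender_name : Option String) (sender_index : Int) : List (String × String) :=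
  if history_rows.isEmpty then history_rows
  else
    let isN := pvIsName sender_name sender_index
    let keep_next := (history_rows.drop 1).map (fun row => !isN row) ++ [true]
    ((history_rows.zip keep_next).filter (fun p => !isN p.1 || p.2)).map Prod.fst

-- ===== PRECONDITION & SPEC =====
-- Pre_ excludes exactly the inputs where Python A raises IndexError:
-- a nonempty list with sender_index outside [-2, 2) for the 2-tuples.
def Pre_collapse_assistant_sequences (history_rows : List (String × String)) (sender_name : Option String) (sender_index : Int) : Prop :=
  history_rows = [] ∨ PySem.Raise.InRange 2 sender_index
instance (history_rows : List (String × String)) (sender_name : Option String) (sender_index : Int) : Decidable (Pre_collapse_assistant_sequences history_rows sender_name sender_index) := by unfold Pre_collapse_assistant_sequences; infer_instance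

def pvWitness_collapse_assistant_sequences : (List (String × String)) × Option String × Int :=
  ([("ai", "hello"), ("ai", "hi there"), ("user", "ok")], some "ai", 0)

def Spec_collapse_assistant_sequences (history_rows : List (String × String)) (sender_name : Option String) (sender_index : Int) (out : List (String × String)) : Prop := out = collapse_assistant_sequences_alt history_rows sender_name sender_index
instance (history_rows : List (String × String)) (sender_name : Option String) (sender_index : Int) (out : List (String × String)) : Decidable (Spec_collapse_assistant_sequences history_rows sender_name sender_index out) := by unfold Spec_collapse_assistant_sequences; infer_instance

-- ===== CLAIM (what is proved, stated in full; the proofs are below) =====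
def Claim_equal_collapse_assistant_sequences : Prop := ∀ (history_rows : List (String × String)) (sender_name : Option String) (sender_index : Int), Dom_collapse_assistant_sequences history_rows sender_name sender_index → Pre_collapse_assistant_sequences history_rows sender_name sender_index → Spec_collapse_assistant_sequences history_rows sender_name sender_index (collapse_assistant_sequences history_rows sender_name sender_index)

-- ===== LEMMAS AND PROOFS =====

-- Reference form: keep each row unless it and its successor are both assistant rows.
def pvSpec (isN : String × String → Bool) : List (String × String) → List (String × String)
  | [] => []
  | [r] => [r]
  | r :: r' :: rest =>
      if isN r && isN r' then pvSpec isN (r' :: rest) else r :: pvSpec isN (r' :: rest)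

lemma pvSpec_cons_notN (isN : String × String → Bool) (r : String × String)
    (l : List (String × String)) (h : isN r = false) :
    pvSpec isN (r :: l) = r :: pvSpec isN l := by
  cases l <;> simp [pvSpec, h]

lemma pvLoopA_acc (isN : String × String → Bool) (c run l : List (String × String)) :
    pvLoopA isN c run l = c ++ pvLoopA isN [] run l := by
  induction l generalizing c run with
  | nil => by_cases h : run.isEmpty <;> simp [pvLoopA, h]
  | cons row rest ih =>
    simp only [pvLoopA]
    split_ifs with h1 h2
    · exact ih c (run ++ [row])
    · rw [ih (c ++ [row]), ih ([] ++ [row])]; simp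
    · rw [ih, ih ([] ++ _)]; simp

lemma pvLoopA_run (isN : String × String → Bool) (l run run' : List (String × String))
    (h : run ≠ []) (h' : run' ≠ []) (hlast : run.getLast? = run'.getLast?) :
    pvLoopA isN [] run l = pvLoopA isN [] run' l := by
  induction l generalizing run run' with
  | nil =>
    simp [pvLoopA, List.isEmpty_iff, h, h', PySem.List.pyGet?_neg_one, hlast]
  | cons row rest ih =>
    cases h1 : isN row with
    | true =>
      simp only [pvLoopA, h1, if_true]
      exact ih (run ++ [row]) (run' ++ [row]) (by simp) (by simp) (by simp)
    | false =>
      have e : ∀ (rn : List (String × String)), rn ≠ [] → pvLoopA isN [] rn (row :: rest)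
          = [(PySem.List.pyGet? rn (-1)).getD ("", ""), row] ++ pvLoopA isN [] [] rest := by
        intro rn hn
        simp only [pvLoopA, h1, Bool.false_eq_true, if_false, List.isEmpty_iff, hn]
        rw [pvLoopA_acc]; simp
      rw [e run h, e run' h', PySem.List.pyGet?_neg_one, PySem.List.pyGet?_neg_one, hlast]

lemma pvLoopA_eq_pvSpec (isN : String × String → Bool) (l : List (String × String)) :
    pvLoopA isN [] [] l = pvSpec isN l ∧
      ∀ r, isN r = true → pvLoopA isN [] [r] l = pvSpec isN (r :: l) := by
  induction l with
  | nil =>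
    refine ⟨by simp [pvLoopA, pvSpec], fun r _ => ?_⟩
    simp [pvLoopA, pvSpec, PySem.List.pyGet?_neg_one]
  | cons r' rest ih =>
    constructor
    · by_cases h : isN r' = true
      · simpa [pvLoopA, h] using ih.2 r' h
      · simp only [Bool.not_eq_true] at h
        rw [show pvLoopA isN [] [] (r' :: rest)
              = pvLoopA isN ([] ++ [r']) [] rest by simp [pvLoopA, h]]
        rw [pvLoopA_acc, ih.1, pvSpec_cons_notN isN r' rest h]
        simp
    · intro r hr
      by_cases h : isN r' = true
      · rw [show pvLoopA isN [] [r] (r' :: rest)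
              = pvLoopA isN [] ([r] ++ [r']) rest by simp [pvLoopA, h]]
        rw [pvLoopA_run isN rest ([r] ++ [r']) [r'] (by simp) (by simp)
              (by simp)]
        rw [ih.2 r' h]
        simp [pvSpec, hr, h]
      · simp only [Bool.not_eq_true] at h
        rw [show pvLoopA isN [] [r] (r' :: rest)
              = pvLoopA isN ([] ++ [(PySem.List.pyGet? [r] (-1)).getD ("", ""), r']) [] rest by
                simp [pvLoopA, h]]
        rw [pvLoopA_acc, ih.1]
        simp [pvSpec, hr, h, PySem.List.pyGet?_neg_one, pvSpec_cons_notN isN r' rest h]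

lemma pvFilt_eq_pvSpec (isN : String × String → Bool) (l : List (String × String)) :
    ((l.zip ((l.drop 1).map (fun row => !isN row) ++ [true])).filter
        (fun p => !isN p.1 || p.2)).map Prod.fst = pvSpec isN l := by
  induction l with
  | nil => simp [pvSpec]
  | cons r l ih =>
    cases l with
    | nil => simp [pvSpec]
    | cons r' rest =>
      simp only [List.drop_succ_cons, List.drop_zero, List.map_cons, List.cons_append,
        List.zip_cons_cons, List.filter_cons] at ih ⊢
      by_cases h : (!isN r || !isN r') = true
      · rw [if_pos h, List.map_cons, ih]
        have : (isN r && isN r') = false := by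
          cases hr : isN r <;> cases hr' : isN r' <;> simp_all
        simp [pvSpec, this]
      · have hb : isN r = true ∧ isN r' = true := by
          cases hr : isN r <;> cases hr' : isN r' <;> simp_all
        rw [if_neg h, ih]
        simp [pvSpec, hb.1, hb.2]

-- ===== VERDICT (by name: the statement is the Claim_ definition above) =====
theorem collapse_assistant_sequences_spec : Claim_equal_collapse_assistant_sequences := by
  intro history_rows sender_name sender_index _ _
  unfold Spec_collapse_assistant_sequences
  unfold collapse_assistant_sequences collapse_assistant_sequences_alt
  by_cases h : history_rows.isEmpty
  · simp [h]
  · simp only [h, Bool.false_eq_true, if_false]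
    rw [(pvLoopA_eq_pvSpec (pvIsName sender_name sender_index) history_rows).1,
        pvFilt_eq_pvSpec]
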